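-- pv_equiv track=rewrite | github.com/olablom/CodeConductor | tests/test_codeconductor_2agents_focused.py | _test_sql_query
-- ===== SOURCE A (Python) =====
-- def _test_sql_query(code: str) -> bool:
--     """Test if SQL query has basic structure"""
--     # More flexible SQL validation - check for SQL keywords
--     sql_keywords = [
--         "SELECT",
--         "FROM",
--         "WHERE",
--         "ORDER BY",
--         "GROUP BY",
--         "HAVING",
--         "JOIN",
--         "UNION",
--     ]
--     code_upper = code.upper()
--     return any(keyword in code_upper for keyword in sql_keywords)
-- ===== SOURCE B (Python) =====
-- def _test_sql_query(code: str) -> bool: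
--     """Test if SQL query has basic structure"""
--     sql_keywords = (
--         "SELECT",
--         "FROM",
--         "WHERE",
--         "ORDER BY",
--         "GROUP BY",
--         "HAVING",
--         "JOIN",
--         "UNION",
--     )
--     code_upper = code.upper()
--     # single left-to-right pass: at each position, test whether some keyword starts there
--     for i in range(len(code_upper)):
--         for kw in sql_keywords:
--             if code_upper.startswith(kw, i):
--                 return True
--     return False
-- ===== Notes on version B (the rewrite author's own statement) =====
-- stated objective: alternative
-- what changed: Replaced the per-keyword whole-string substring scans ('kw in code_upper' for each of the 8 keywords) by one left-to-right scan over positions that tests at each position whether any keyword starts there (prefix test), returning early on the first hit.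
import Mathlib
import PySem

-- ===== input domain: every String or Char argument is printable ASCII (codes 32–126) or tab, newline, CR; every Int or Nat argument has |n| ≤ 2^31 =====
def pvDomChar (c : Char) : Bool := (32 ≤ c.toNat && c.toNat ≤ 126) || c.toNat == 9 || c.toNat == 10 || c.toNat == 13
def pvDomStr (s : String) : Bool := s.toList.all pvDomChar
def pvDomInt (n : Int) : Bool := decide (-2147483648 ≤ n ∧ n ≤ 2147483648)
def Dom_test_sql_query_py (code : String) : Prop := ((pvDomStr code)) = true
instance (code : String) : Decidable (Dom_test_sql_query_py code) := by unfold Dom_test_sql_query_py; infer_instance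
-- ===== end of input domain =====

-- B replaces the eight independent whole-string substring scans by one left-to-right scan
-- that tests at each position whether some keyword starts there (objective: alternative).

-- ===== PORT A =====
def test_sql_query_py (code : String) : Bool :=
  let sql_keywords : List String :=
    ["SELECT", "FROM", "WHERE", "ORDER BY", "GROUP BY", "HAVING", "JOIN", "UNION"]
  let code_upper := PySem.Str.upper code
  sql_keywords.any (fun keyword => PySem.Str.isIn keyword code_upper)

-- ===== PORT B =====
def sqlKeywordsB : List String :=
  ["SELECT", "FROM", "WHERE", "ORDER BY", "GROUP BY", "HAVING", "JOIN", "UNION"]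

-- the 'for i in range(len(code_upper))' loop of Source B as structural recursion over suffixes;
-- 'code_upper.startswith(kw, i)' is PySem.Chars.startswith on the suffix starting at i
def sqlScan : List Char → Bool
  | [] => false
  | c :: rest =>
    if sqlKeywordsB.any (fun kw => PySem.Chars.startswith (c :: rest) kw.toList) then true
    else sqlScan rest

def test_sql_query_py_alt (code : String) : Bool :=
  sqlScan (PySem.Str.upper code).toList

-- ===== PRECONDITION & SPEC =====
def Spec_test_sql_query_py (code : String) (out : Bool) : Prop := out = test_sql_query_py_alt code
instance (code : String) (out : Bool) : Decidable (Spec_test_sql_query_py code out) := by unfold Spec_test_sql_query_py; infer_instance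

-- ===== CLAIM (what is proved, stated in full; the proofs are below) =====
def Claim_equal_test_sql_query_py : Prop := ∀ (code : String), Dom_test_sql_query_py code → Spec_test_sql_query_py code (test_sql_query_py code)

-- ===== LEMMAS AND PROOFS =====

-- the suffix scan finds a keyword iff some keyword is a substring
lemma sqlScan_eq_any_isIn (u : List Char) :
    sqlScan u = sqlKeywordsB.any (fun kw => PySem.Chars.isIn kw.toList u) := by
  induction u with
  | nil => decide
  | cons c rest ih =>
    by_cases h : sqlKeywordsB.any (fun kw => PySem.Chars.startswith (c :: rest) kw.toList) = true
    · rw [sqlScan, if_pos h]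
      obtain ⟨kw, hk, hs⟩ := List.any_eq_true.mp h
      symm
      exact List.any_eq_true.mpr ⟨kw, hk,
        (PySem.Chars.isIn_iff_infix _ _).mpr ((PySem.Chars.startswith_iff _ _).mp hs).isInfix⟩
    · rw [sqlScan, if_neg h, ih]
      have hall := List.any_eq_false.mp (Bool.eq_false_iff.mpr h)
      rw [Bool.eq_iff_iff]
      simp only [List.any_eq_true]
      constructor
      · rintro ⟨kw, hk, hin⟩
        exact ⟨kw, hk, (PySem.Chars.isIn_iff_infix _ _).mpr
          (((PySem.Chars.isIn_iff_infix _ _).mp hin).trans (List.suffix_cons c rest).isInfix)⟩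
      · rintro ⟨kw, hk, hin⟩
        refine ⟨kw, hk, (PySem.Chars.isIn_iff_infix _ _).mpr ?_⟩
        rcases List.infix_cons_iff.mp ((PySem.Chars.isIn_iff_infix _ _).mp hin) with hp | hi
        · exact absurd ((PySem.Chars.startswith_iff _ _).mpr hp) (by simpa using hall kw hk)
        · exact hi

-- ===== VERDICT (by name: the statement is the Claim_ definition above) =====
theorem test_sql_query_py_spec : Claim_equal_test_sql_query_py := by
  intro code _
  show test_sql_query_py code = test_sql_query_py_alt code
  simp only [test_sql_query_py, test_sql_query_py_alt, PySem.Str.isIn_eq,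
    sqlScan_eq_any_isIn, sqlKeywordsB]
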